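-- pv_equiv track=rewrite | github.com/coderelatedprojects/nonogramsolver | src/solver.py | _convert_from_binary_solution_
-- ===== SOURCE A (Python) =====
-- from typing import List
--
-- def _convert_from_binary_solution_(binary_solution: str, vector_values: List[int]) -> int:
--     i = 0
--     solution = ''
--     for bit in binary_solution:
--         if bit == '0':
--             solution += '0'
--         else:
--             if i > 0: solution += '0'
--             for j in range(vector_values[i]):
--                 solution += '1'
--             i += 1
--     return int(solution,2)
-- ===== SOURCE B (Python) =====
-- from typing import List
--
-- def _convert_from_binary_solution_(binary_solution: str, vector_values: List[int]) -> int: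
--     # Integer accumulator with shift arithmetic: each '0' bit shifts in a zero,
--     # each block bit appends (after a separator zero, except for the first block)
--     # a closed-form run of vector_values[i] ones.  No string is built.
--     i = 0
--     acc = 0
--     for bit in binary_solution:
--         if bit == '0':
--             acc <<= 1
--         else:
--             if i > 0:
--                 acc <<= 1
--             run = max(vector_values[i], 0)  # range(v) is empty for v <= 0
--             acc = (acc << run) | ((1 << run) - 1)
--             i += 1
--     return acc
-- ===== Notes on version B (the rewrite author's own statement) =====
-- stated objective: alternative
-- what changed: B replaces A's character-by-character string building (inner loop of '1' appends, then int(s,2) parse) with a single integer accumulator using shifts and a closed-form block of ones per run, eliminating the inner loop and the final string parse.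
import Mathlib
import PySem

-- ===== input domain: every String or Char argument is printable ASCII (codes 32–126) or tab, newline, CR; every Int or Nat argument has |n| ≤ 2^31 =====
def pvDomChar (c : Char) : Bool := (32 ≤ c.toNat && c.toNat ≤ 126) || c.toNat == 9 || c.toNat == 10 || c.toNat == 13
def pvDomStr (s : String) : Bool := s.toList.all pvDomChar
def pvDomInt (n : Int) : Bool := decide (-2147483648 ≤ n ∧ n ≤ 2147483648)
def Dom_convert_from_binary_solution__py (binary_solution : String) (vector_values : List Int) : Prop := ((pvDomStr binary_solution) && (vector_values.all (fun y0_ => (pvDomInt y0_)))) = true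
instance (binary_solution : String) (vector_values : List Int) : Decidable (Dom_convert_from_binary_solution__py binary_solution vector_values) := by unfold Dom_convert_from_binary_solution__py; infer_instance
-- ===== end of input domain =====

-- B keeps an integer accumulator with shift arithmetic (closed-form block of ones per run)
-- instead of A's string building + int(s,2) parse; alternative decomposition, same cost class.


-- ===== PORT A =====
-- int(s, 2): exact for the strings A builds (nonempty, only '0'/'1' characters);
-- the empty string (where Python raises ValueError) is handled at the call site.
def pvBin (cs : List Char) : Int :=
  cs.foldl (fun a c => a * 2 + (if c == '1' then 1 else 0)) 0

-- one iteration of A's loop; none = IndexError on vector_values[i]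
def pvStepA (vv : List Int) (st : Option (Int × List Char)) (bit : Char) : Option (Int × List Char) :=
  match st with
  | none => none
  | some (i, sol) =>
    if bit == '0' then some (i, sol ++ ['0'])
    else
      match PySem.List.pyGet? vv i with
      | none => none
      | some v =>
        let sol1 := if i > 0 then sol ++ ['0'] else sol
        some (i + 1, (PySem.List.pyRange 0 v 1).foldl (fun s _ => s ++ ['1']) sol1)

def convert_from_binary_solution__py (binary_solution : String) (vector_values : List Int) : Int :=
  match binary_solution.toList.foldl (pvStepA vector_values) (some (0, [])) with
  | none => 0                                      -- IndexError: excluded by Pre_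
  | some (_, sol) => if sol = [] then 0 else pvBin sol   -- int('',2) raises: excluded by Pre_

-- ===== PORT B =====
-- one iteration of B's loop; none = IndexError on vector_values[i].
-- (acc << run) | ((1 << run) - 1) = acc * 2^run + (2^run - 1): exact, the low run bits are zero.
def pvStepB (vv : List Int) (st : Option (Int × Int)) (bit : Char) : Option (Int × Int) :=
  match st with
  | none => none
  | some (i, acc) =>
    if bit == '0' then some (i, acc * 2)
    else
      match PySem.List.pyGet? vv i with
      | none => none
      | some v =>
        let acc1 := if i > 0 then acc * 2 else acc
        let run := (max v 0).toNat
        some (i + 1, acc1 * 2 ^ run + (2 ^ run - 1))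

def convert_from_binary_solution__py_alt (binary_solution : String) (vector_values : List Int) : Int :=
  match binary_solution.toList.foldl (pvStepB vector_values) (some (0, 0)) with
  | none => 0
  | some (_, acc) => acc

-- ===== PRECONDITION & SPEC =====
-- Pre_ excludes exactly the inputs where A raises: IndexError (more non-'0' characters than
-- values) and ValueError from int('',2) (empty string, or a single non-'0' character whose
-- run length is <= 0).
def Pre_convert_from_binary_solution__py (binary_solution : String) (vector_values : List Int) : Prop :=
  binary_solution.toList ≠ [] ∧
  binary_solution.toList.countP (fun c => c != '0') ≤ vector_values.length ∧
  ¬ (binary_solution.toList.length = 1 ∧ binary_solution.toList.headD '0' ≠ '0' ∧ (vector_values.headD 0) ≤ 0)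
instance (binary_solution : String) (vector_values : List Int) : Decidable (Pre_convert_from_binary_solution__py binary_solution vector_values) := by unfold Pre_convert_from_binary_solution__py; infer_instance

def pvWitness_convert_from_binary_solution__py : String × List Int := ("10110", [2, 3, 1])


def Spec_convert_from_binary_solution__py (binary_solution : String) (vector_values : List Int) (out : Int) : Prop := out = convert_from_binary_solution__py_alt binary_solution vector_values
instance (binary_solution : String) (vector_values : List Int) (out : Int) : Decidable (Spec_convert_from_binary_solution__py binary_solution vector_values out) := by unfold Spec_convert_from_binary_solution__py; infer_instance

-- ===== CLAIM (what is proved, stated in full; the proofs are below) =====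
def Claim_equal_convert_from_binary_solution__py : Prop := ∀ (binary_solution : String) (vector_values : List Int), Dom_convert_from_binary_solution__py binary_solution vector_values → Pre_convert_from_binary_solution__py binary_solution vector_values → Spec_convert_from_binary_solution__py binary_solution vector_values (convert_from_binary_solution__py binary_solution vector_values)


-- ===== LEMMAS AND PROOFS =====

lemma pvFoldA_none (vv : List Int) (cs : List Char) :
    cs.foldl (pvStepA vv) none = none := by
  induction cs with
  | nil => rfl
  | cons c cs ih => simpa [pvStepA] using ih

lemma pvFoldB_none (vv : List Int) (cs : List Char) :
    cs.foldl (pvStepB vv) none = none := by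
  induction cs with
  | nil => rfl
  | cons c cs ih => simpa [pvStepB] using ih

lemma pvOnesFold {α : Type} (l : List α) (sol : List Char) :
    l.foldl (fun s _ => s ++ ['1']) sol = sol ++ List.replicate l.length '1' := by
  induction l generalizing sol with
  | nil => simp
  | cons x l ih =>
    rw [List.foldl_cons, ih, List.append_assoc, List.length_cons, List.replicate_succ]
    simp

lemma pvBin_append0 (sol : List Char) : pvBin (sol ++ ['0']) = pvBin sol * 2 := by
  simp [pvBin, List.foldl_append]

lemma pvBin_ones (sol : List Char) (n : Nat) :
    pvBin (sol ++ List.replicate n '1') = pvBin sol * 2 ^ n + (2 ^ n - 1) := by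
  suffices h : ∀ n (a : Int),
      (List.replicate n '1').foldl (fun a c => a * 2 + (if c == '1' then 1 else 0)) a
        = a * 2 ^ n + (2 ^ n - 1) by
    unfold pvBin
    rw [List.foldl_append]
    exact h n _
  intro n
  induction n with
  | zero => intro a; simp
  | succ n ih =>
    intro a
    rw [List.replicate_succ, List.foldl_cons]
    have h1 : (a * 2 + (if ('1':Char) == '1' then (1:Int) else 0)) = a * 2 + 1 := by norm_num
    rw [h1, ih, pow_succ]
    ring

lemma pvRel (vv : List Int) (cs : List Char) : ∀ (i : Int) (sol : List Char),
    (cs.foldl (pvStepA vv) (some (i, sol)) = none ∧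
     cs.foldl (pvStepB vv) (some (i, pvBin sol)) = none) ∨
    (∃ i' sol', cs.foldl (pvStepA vv) (some (i, sol)) = some (i', sol') ∧
     cs.foldl (pvStepB vv) (some (i, pvBin sol)) = some (i', pvBin sol')) := by
  induction cs with
  | nil => intro i sol; exact Or.inr ⟨i, sol, rfl, rfl⟩
  | cons c cs ih =>
    intro i sol
    by_cases hc : c == '0'
    · have hA : pvStepA vv (some (i, sol)) c = some (i, sol ++ ['0']) := by
        simp [pvStepA, hc]
      have hB : pvStepB vv (some (i, pvBin sol)) c = some (i, pvBin sol * 2) := by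
        simp [pvStepB, hc]
      rw [List.foldl_cons, List.foldl_cons, hA, hB, ← pvBin_append0]
      exact ih i (sol ++ ['0'])
    · cases hg : PySem.List.pyGet? vv i with
      | none =>
        have hA : pvStepA vv (some (i, sol)) c = none := by
          simp [pvStepA, hc, hg]
        have hB : pvStepB vv (some (i, pvBin sol)) c = none := by
          simp [pvStepB, hc, hg]
        rw [List.foldl_cons, List.foldl_cons, hA, hB]
        exact Or.inl ⟨pvFoldA_none vv cs, pvFoldB_none vv cs⟩
      | some v =>
        have hlen : (PySem.List.pyRange 0 v 1).length = (max v 0).toNat := by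
          rw [PySem.List.length_pyRange_one]; omega
        have hA : pvStepA vv (some (i, sol)) c
            = some (i + 1, (if i > 0 then sol ++ ['0'] else sol) ++ List.replicate (max v 0).toNat '1') := by
          simp only [pvStepA, hc, hg]
          rw [if_neg (by simpa using hc), pvOnesFold, hlen]
        have hsol1 : pvBin (if i > 0 then sol ++ ['0'] else sol)
            = (if i > 0 then pvBin sol * 2 else pvBin sol) := by
          split <;> simp [pvBin_append0]
        have hB : pvStepB vv (some (i, pvBin sol)) c
            = some (i + 1, pvBin ((if i > 0 then sol ++ ['0'] else sol) ++ List.replicate (max v 0).toNat '1')) := by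
          simp only [pvStepB, hc, hg]
          rw [if_neg (by simpa using hc), pvBin_ones, hsol1]
        rw [List.foldl_cons, List.foldl_cons, hA, hB]
        exact ih (i + 1) _

-- ===== VERDICT (by name: the statement is the Claim_ definition above) =====
theorem convert_from_binary_solution__py_spec : Claim_equal_convert_from_binary_solution__py := by
  intro bs vv _ _
  unfold Spec_convert_from_binary_solution__py
  unfold convert_from_binary_solution__py convert_from_binary_solution__py_alt
  have h0 : pvBin [] = 0 := rfl
  rcases pvRel vv bs.toList 0 [] with ⟨hA, hB⟩ | ⟨i', sol', hA, hB⟩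
  · rw [hA]; rw [h0] at hB; rw [hB]
  · rw [hA]; rw [h0] at hB; rw [hB]
    by_cases hs : sol' = []
    · simp [hs, pvBin]
    · simp [hs]
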